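-- pv_equiv track=rewrite | github.com/daniel-reich/ubiquitous-fiesta | MNePwAcuoKG9Cza8G_6.py | build_staircase
-- ===== SOURCE A (Python) =====
-- def build_staircase(height, block):
--   def build_list(height, block, l):
--     return ([block for i in range(height)] +
--             ["_" for i in range(height,l)]  )
--   ret = []
--   for i in range(1,height + 1):
--     ret.append(build_list(i, block, height))
--   return ret
-- ===== SOURCE B (Python) =====
-- def build_staircase(height, block):
--     row = ['_'] * height
--     ret = []
--     for i in range(height):
--         row = row.copy()
--         row[i] = block
--         ret.append(row)
--     return ret
-- ===== Notes on version B (the rewrite author's own statement) =====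
-- stated objective: alternative
-- what changed: B derives each row from the previous one by copying the running row and turning one underscore into a block, instead of rebuilding every row from two range-based comprehensions.
import Mathlib
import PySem

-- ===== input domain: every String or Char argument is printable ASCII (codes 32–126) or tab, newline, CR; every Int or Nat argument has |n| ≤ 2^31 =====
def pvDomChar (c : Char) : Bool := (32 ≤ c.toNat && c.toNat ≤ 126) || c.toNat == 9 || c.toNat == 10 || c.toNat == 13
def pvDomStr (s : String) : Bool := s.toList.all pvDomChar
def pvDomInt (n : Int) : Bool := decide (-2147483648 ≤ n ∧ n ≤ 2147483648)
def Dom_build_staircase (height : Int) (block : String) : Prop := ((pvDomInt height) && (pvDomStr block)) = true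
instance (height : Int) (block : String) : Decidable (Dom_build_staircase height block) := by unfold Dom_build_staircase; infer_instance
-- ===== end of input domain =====

-- B builds each row from the previous one (copy, set one cell); same result, same cost ("alternative").

-- ===== PORT A =====
-- helper build_list(height, block, l): [block]*height-comprehension ++ ["_"]*(l-height)-comprehension
def pvBuildList (h : Int) (block : String) (l : Int) : List String :=
  (PySem.List.pyRange 0 h 1).map (fun _ => block) ++ (PySem.List.pyRange h l 1).map (fun _ => "_")

def build_staircase (height : Int) (block : String) : List (List String) :=
  (PySem.List.pyRange 1 (height + 1) 1).foldl
    (fun ret i => ret ++ [pvBuildList i block height]) []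

-- ===== PORT B =====
-- ['_'] * height  (Python list-repeat: empty for height ≤ 0)
def build_staircase_alt (height : Int) (block : String) : List (List String) :=
  ((PySem.List.pyRange 0 height 1).foldl
    (fun (st : List String × List (List String)) i =>
      let row := st.1.set i.toNat block   -- row = row.copy(); row[i] = block (0 ≤ i < height, always in range)
      (row, st.2 ++ [row]))
    (List.replicate height.toNat "_", [])).2

-- ===== PRECONDITION & SPEC =====
def Spec_build_staircase (height : Int) (block : String) (out : List (List String)) : Prop := out = build_staircase_alt height block
instance (height : Int) (block : String) (out : List (List String)) : Decidable (Spec_build_staircase height block out) := by unfold Spec_build_staircase; infer_instance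

-- ===== CLAIM (what is proved, stated in full; the proofs are below) =====
def Claim_equal_build_staircase : Prop := ∀ (height : Int) (block : String), Dom_build_staircase height block → Spec_build_staircase height block (build_staircase height block)

-- ===== LEMMAS AND PROOFS =====

-- the common closed form of row number k (0-based) of a staircase of height h
def pvRow (h k : Nat) (block : String) : List String :=
  List.replicate (k + 1) block ++ List.replicate (h - (k + 1)) "_"

lemma pvBuildList_closed (block : String) (h k : Nat) (hk : k < h) :
    pvBuildList (1 + (k : Int)) block (h : Nat) = pvRow h k block := by
  unfold pvBuildList pvRow
  rw [PySem.List.pyRange_one (0 : Int) (1 + k), PySem.List.pyRange_one (1 + (k : Int)) h]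
  have h1 : ((1 : Int) + (k : Int) - 0).toNat = k + 1 := by omega
  have h2 : ((h : Int) - (1 + (k : Int))).toNat = h - (k + 1) := by omega
  rw [h1, h2]
  simp [Function.comp_def, List.map_const', List.length_range]

lemma portA_closed (block : String) (h : Nat) :
    build_staircase (h : Int) block = (List.range h).map (fun k => pvRow h k block) := by
  unfold build_staircase
  rw [PySem.List.foldl_append_singleton_eq_map]
  rw [PySem.List.pyRange_one 1 ((h : Int) + 1)]
  simp only [add_sub_cancel_right, Int.toNat_natCast, List.map_map, List.nil_append]
  apply List.map_congr_left
  intro k hk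
  simp only [List.mem_range] at hk
  exact pvBuildList_closed block h k hk

lemma portB_loop (block : String) (h : Nat) (n : Nat) (hn : n ≤ h) (acc : List (List String)) :
    (PySem.List.pyRange 0 (n : Int) 1).foldl
      (fun (st : List String × List (List String)) i =>
        let row := st.1.set i.toNat block
        (row, st.2 ++ [row]))
      (List.replicate h "_", acc)
    = (List.replicate n block ++ List.replicate (h - n) "_",
       acc ++ (List.range n).map (fun k => pvRow h k block)) := by
  induction n with
  | zero => simp
  | succ m ih =>
    have hm : m ≤ h := Nat.le_of_succ_le hn
    have hsplit : PySem.List.pyRange 0 ((m : Int) + 1) 1 =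
        PySem.List.pyRange 0 (m : Int) 1 ++ [(m : Int)] :=
      PySem.List.pyRange_one_succ_right (by exact_mod_cast Nat.zero_le m)
    push_cast
    rw [hsplit, List.foldl_append, ih hm]
    simp only [List.foldl_cons, List.foldl_nil, Int.toNat_natCast, List.range_succ,
      List.map_append, List.map_cons, List.map_nil, ← List.append_assoc]
    have hrow : (List.replicate m block ++ List.replicate (h - m) "_").set m block
        = List.replicate (m + 1) block ++ List.replicate (h - (m + 1)) "_" := by
      have hhm : h - m = (h - (m + 1)) + 1 := by omega
      rw [hhm, List.replicate_succ,
          List.set_append_right _ _ (by simp),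
          List.length_replicate, Nat.sub_self, List.set_cons_zero,
          List.replicate_succ' ..]
      simp
    rw [hrow]
    simp [pvRow]

lemma ports_agree (height : Int) (block : String) :
    build_staircase height block = build_staircase_alt height block := by
  rcases Int.lt_or_le height 0 with hneg | hpos
  · unfold build_staircase build_staircase_alt
    rw [PySem.List.pyRange_one_eq_nil (by omega), PySem.List.pyRange_one_eq_nil (by omega)]
    simp
  · obtain ⟨h, rfl⟩ := Int.eq_ofNat_of_zero_le hpos
    rw [portA_closed]
    unfold build_staircase_alt
    rw [show ((h : Int)).toNat = h from Int.toNat_natCast h, portB_loop block h h (le_refl h) []]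
    simp

-- ===== VERDICT (by name: the statement is the Claim_ definition above) =====
theorem build_staircase_spec : Claim_equal_build_staircase := by
  intro height block _
  exact ports_agree height block
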